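-- pv_equiv track=rewrite | github.com/pypi-data/pypi-mirror-255 | packages/dj-migration-automation/dj_migration_automation-0.1.3.tar.gz/dj_migration_automation-0.1.3/src/service/canister_transfers.py | get_canister_sorted_on_source_location
-- ===== SOURCE A (Python) =====
-- from collections import OrderedDict
--
-- def get_canister_sorted_on_source_location(canister_list, source_location_dict):
--     """
--
--     @param canister_list:
--     @param source_location_dict:
--     @return:
--     """
--     sorted_can_dict = OrderedDict()
--
--     for can in canister_list:
--         if source_location_dict[can] not in sorted_can_dict.keys():
--             sorted_can_dict[source_location_dict[can]] = list()
--         sorted_can_dict[source_location_dict[can]].append(can)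
--     ordered_can_dict = sorted(sorted_can_dict, key=lambda key: len(sorted_can_dict[key]), reverse=True)
--     sorted_can_list = [item for sublist in ordered_can_dict for item in sorted_can_dict[sublist]]
--     return sorted_can_list
-- ===== SOURCE B (Python) =====
-- def get_canister_sorted_on_source_location(canister_list, source_location_dict):
--     counts = {}
--     first_idx = {}
--     for i, can in enumerate(canister_list):
--         loc = source_location_dict[can]
--         counts[loc] = counts.get(loc, 0) + 1
--         if loc not in first_idx:
--             first_idx[loc] = i
--     return sorted(canister_list,
--                   key=lambda can: (-counts[source_location_dict[can]],
--                                    first_idx[source_location_dict[can]]))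
-- ===== Notes on version B (the rewrite author's own statement) =====
-- stated objective: alternative
-- what changed: Instead of building per-location lists in an ordered dict, sorting the keys by group length and flattening, B computes only counts and first-occurrence indices in one pass and does a single stable sort of the elements by the composite key (-count, first_index).
import Mathlib
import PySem

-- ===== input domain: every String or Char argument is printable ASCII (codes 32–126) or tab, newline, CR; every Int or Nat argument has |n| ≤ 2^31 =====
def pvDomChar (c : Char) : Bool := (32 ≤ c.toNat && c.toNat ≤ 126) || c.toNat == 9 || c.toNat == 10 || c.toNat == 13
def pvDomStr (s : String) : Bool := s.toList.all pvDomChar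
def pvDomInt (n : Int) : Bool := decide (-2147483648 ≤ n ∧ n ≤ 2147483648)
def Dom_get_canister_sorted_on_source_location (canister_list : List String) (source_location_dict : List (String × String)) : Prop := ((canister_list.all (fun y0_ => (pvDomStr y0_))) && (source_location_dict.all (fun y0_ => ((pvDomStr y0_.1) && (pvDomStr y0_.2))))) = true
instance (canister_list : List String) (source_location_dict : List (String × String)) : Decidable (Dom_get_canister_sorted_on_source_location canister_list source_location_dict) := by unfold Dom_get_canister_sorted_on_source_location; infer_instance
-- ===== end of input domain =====

-- B does a single stable sort of the elements by (-count of their location, first index of their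
-- location) instead of A's group-lists dict + key sort + flatten.  Same value everywhere A returns.

-- shared helper: the association-list lookup source_location_dict[can] (first match;
-- the "" default is never used on inputs satisfying Pre_, where the key is present)
def pvLoc (source_location_dict : List (String × String)) (can : String) : String :=
  (((source_location_dict.find? (fun p => p.1 == can)).map (fun p => p.2)).getD "")

-- ===== PORT A =====
def get_canister_sorted_on_source_location (canister_list : List String) (source_location_dict : List (String × String)) : List String :=
  let sorted_can_dict : PySem.Dict String (List String) :=
    canister_list.foldl (fun d can =>
      let loc := pvLoc source_location_dict can
      let d := if d.contains loc then d else d.insert loc ([] : List String)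
      d.insert loc (d.getD loc [] ++ [can])) PySem.Dict.empty
  let ordered_can_dict :=
    PySem.List.sorted sorted_can_dict.keys (fun k => (sorted_can_dict.getD k []).length) true
  ordered_can_dict.flatMap (fun k => sorted_can_dict.getD k [])

-- ===== PORT B =====
def get_canister_sorted_on_source_location_alt (canister_list : List String) (source_location_dict : List (String × String)) : List String :=
  let counts : PySem.Dict String Int :=
    canister_list.foldl (fun d can =>
      let loc := pvLoc source_location_dict can
      d.insert loc (d.getD loc 0 + 1)) PySem.Dict.empty
  let first_idx : PySem.Dict String Int :=
    (PySem.List.enumerate canister_list).foldl (fun d p =>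
      let loc := pvLoc source_location_dict p.2
      if d.contains loc then d else d.insert loc p.1) PySem.Dict.empty
  PySem.List.sorted2 canister_list
    (fun can => -(counts.getD (pvLoc source_location_dict can) 0))
    (fun can => first_idx.getD (pvLoc source_location_dict can) 0) false

-- ===== PRECONDITION & SPEC =====
-- Pre_: every canister occurs as a key of the dict; on any other input A raises KeyError.
def Pre_get_canister_sorted_on_source_location (canister_list : List String) (source_location_dict : List (String × String)) : Prop :=
  (canister_list.all (fun can => source_location_dict.any (fun p => p.1 == can))) = true
instance (canister_list : List String) (source_location_dict : List (String × String)) : Decidable (Pre_get_canister_sorted_on_source_location canister_list source_location_dict) := by unfold Pre_get_canister_sorted_on_source_location; infer_instance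

def pvWitness_get_canister_sorted_on_source_location : List String × (List (String × String)) :=
  (["c1", "c2", "c3"], [("c1", "L1"), ("c2", "L2"), ("c3", "L1")])

def Spec_get_canister_sorted_on_source_location (canister_list : List String) (source_location_dict : List (String × String)) (out : List String) : Prop := out = get_canister_sorted_on_source_location_alt canister_list source_location_dict
instance (canister_list : List String) (source_location_dict : List (String × String)) (out : List String) : Decidable (Spec_get_canister_sorted_on_source_location canister_list source_location_dict out) := by unfold Spec_get_canister_sorted_on_source_location; infer_instance

-- ===== CLAIM (what is proved, stated in full; the proofs are below) =====
def Claim_equal_get_canister_sorted_on_source_location : Prop := ∀ (canister_list : List String) (source_location_dict : List (String × String)), Dom_get_canister_sorted_on_source_location canister_list source_location_dict → Pre_get_canister_sorted_on_source_location canister_list source_location_dict → Spec_get_canister_sorted_on_source_location canister_list source_location_dict (get_canister_sorted_on_source_location canister_list source_location_dict)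

-- ===== LEMMAS AND PROOFS =====

def pvLex {α : Type} (k1 k2 : α → Int) (a b : α) : Bool :=
  decide (k1 a < k1 b) || (!decide (k1 b < k1 a) && decide (k2 a < k2 b))

theorem sorted2_eq_foldl {α : Type} (xs : List α) (k1 k2 : α → Int) :
    PySem.List.sorted2 xs k1 k2 false = xs.foldl (fun acc x => PySem.List.insertBy (pvLex k1 k2) x acc) [] := rfl

theorem insertBy_nil {α : Type} (b : α → α → Bool) (x : α) : PySem.List.insertBy b x [] = [x] := rfl

theorem insertBy_cons {α : Type} (b : α → α → Bool) (x y : α) (ys : List α) :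
    PySem.List.insertBy b x (y :: ys) = if b x y then x :: y :: ys else y :: PySem.List.insertBy b x ys := rfl

theorem insertBy_append_not {α : Type} (b : α → α → Bool) (x : α) (l t : List α)
    (h : ∀ y ∈ l, b x y = false) :
    PySem.List.insertBy b x (l ++ t) = l ++ PySem.List.insertBy b x t := by
  induction l with
  | nil => simp
  | cons z l ih =>
    rw [List.cons_append, insertBy_cons, h z (by simp), if_neg (by simp),
      ih (fun y hy => h y (by simp [hy])), List.cons_append]

-- lex order facts
theorem pvLex_asymm {α : Type} (k1 k2 : α → Int) {a b : α} (h : pvLex k1 k2 a b = true) :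
    pvLex k1 k2 b a = false := by
  by_cases c1 : k1 a < k1 b <;> by_cases c2 : k1 b < k1 a <;>
    by_cases c3 : k2 a < k2 b <;> by_cases c4 : k2 b < k2 a <;>
    simp_all [pvLex] <;> omega

theorem pvLex_eq_false_of_keys_eq {α : Type} (k1 k2 : α → Int) {a b : α}
    (h1 : k1 a = k1 b) (h2 : k2 a = k2 b) : pvLex k1 k2 a b = false := by
  simp [pvLex, h1, h2]

theorem pvLex_keys_eq_of_both_false {α : Type} (k1 k2 : α → Int) {a b : α}
    (h1 : pvLex k1 k2 a b = false) (h2 : pvLex k1 k2 b a = false) :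
    k1 a = k1 b ∧ k2 a = k2 b := by
  unfold pvLex at h1 h2
  rcases Bool.or_eq_false_iff.mp h1 with ⟨x1, y1⟩
  rcases Bool.or_eq_false_iff.mp h2 with ⟨x2, y2⟩
  rcases Bool.and_eq_false_iff.mp y1 with z1 | z1 <;>
  rcases Bool.and_eq_false_iff.mp y2 with z2 | z2 <;>
    simp_all <;> omega

theorem pvLex_negtrans {α : Type} (k1 k2 : α → Int) {x y z : α}
    (h1 : pvLex k1 k2 x y = true) (h2 : pvLex k1 k2 z y = false) : pvLex k1 k2 z x = false := by
  by_cases c1 : k1 x < k1 y <;> by_cases c2 : k1 y < k1 x <;>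
    by_cases c3 : k1 z < k1 x <;> by_cases c4 : k1 x < k1 z <;>
    by_cases c5 : k1 z < k1 y <;> by_cases c6 : k1 y < k1 z <;>
    simp_all [pvLex] <;> omega

-- insertion sort pairwise invariant: result is pairwise (fun a b => before b a = false)
theorem insertBy_pairwise {α : Type} (k1 k2 : α → Int) (x : α) (ys : List α)
    (h : ys.Pairwise (fun a b => pvLex k1 k2 b a = false)) :
    (PySem.List.insertBy (pvLex k1 k2) x ys).Pairwise (fun a b => pvLex k1 k2 b a = false) := by
  induction ys with
  | nil => simp [insertBy_nil]
  | cons y ys ih =>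
    rw [insertBy_cons]
    rcases List.pairwise_cons.mp h with ⟨hy, hys⟩
    by_cases hb : pvLex k1 k2 x y = true
    · rw [if_pos hb]
      refine List.pairwise_cons.mpr ⟨?_, h⟩
      intro z hz
      rcases List.mem_cons.mp hz with rfl | hz
      · exact pvLex_asymm k1 k2 hb
      · exact pvLex_negtrans k1 k2 hb (hy z hz)
    · rw [if_neg hb]
      refine List.pairwise_cons.mpr ⟨?_, ih hys⟩
      intro z hz
      rcases (PySem.List.mem_insertBy _ _ _ _).mp hz with rfl | hz
      · exact Bool.not_eq_true _ ▸ (by simpa using hb)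
      · exact hy z hz

theorem foldl_insertBy_pairwise {α : Type} (k1 k2 : α → Int) (l : List α) :
    (l.foldl (fun acc x => PySem.List.insertBy (pvLex k1 k2) x acc) []).Pairwise
      (fun a b => pvLex k1 k2 b a = false) := by
  suffices h : ∀ acc, acc.Pairwise (fun a b => pvLex k1 k2 b a = false) →
      (l.foldl (fun acc x => PySem.List.insertBy (pvLex k1 k2) x acc) acc).Pairwise
        (fun a b => pvLex k1 k2 b a = false) from h [] (by simp)
  induction l with
  | nil => intro acc h; simpa using h
  | cons x l ih => intro acc h; exact ih _ (insertBy_pairwise k1 k2 x acc h)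

theorem insertBy_congr {α : Type} (p q : α → α → Bool) (x : α) (ys : List α)
    (h : ∀ y ∈ ys, p x y = q x y) :
    PySem.List.insertBy p x ys = PySem.List.insertBy q x ys := by
  induction ys with
  | nil => rfl
  | cons y ys ih =>
    rw [insertBy_cons, insertBy_cons, h y (by simp), ih (fun z hz => h z (by simp [hz]))]

-- A's reverse sort on the count key equals B's lex sort on (-count, idx), when idx is
-- strictly increasing along the input list
theorem sortRev_eq_sorted2 {α : Type} (cnt : α → Nat) (idx : α → Int) :
    ∀ (K : List α), K.Pairwise (fun a b => idx a < idx b) →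
    PySem.List.sorted K cnt true = PySem.List.sorted2 K (fun c => -(cnt c : Int)) idx false := by
  intro K
  induction K using List.reverseRecOn with
  | nil => intro _; rfl
  | append_singleton K c ih =>
    intro hp
    have hK : K.Pairwise fun a b => idx a < idx b := hp.sublist (by simp)
    have hlt : ∀ b ∈ K, idx b < idx c := by
      have := List.pairwise_append.mp hp
      intro b hb; exact this.2.2 b hb c (by simp)
    rw [PySem.List.sorted_rev_eq_foldl_insertBy, List.foldl_append, sorted2_eq_foldl,
      List.foldl_append]
    simp only [List.foldl_cons, List.foldl_nil]
    rw [← PySem.List.sorted_rev_eq_foldl_insertBy, ← sorted2_eq_foldl, ih hK]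
    apply insertBy_congr
    intro y hy
    have hyK : y ∈ K := by
      have := PySem.List.sorted2_perm (xs := K) (k1 := fun c => -(cnt c : Int)) (k2 := idx) (rev := false)
      exact this.mem_iff.mp hy
    have hylt := hlt y hyK
    by_cases h1 : cnt y < cnt c <;> simp [pvLex, h1] <;> omega

theorem dedup_append_singleton {α : Type} [BEq α] [LawfulBEq α] (l : List α) (c : α) :
    PySem.List.dedup (l ++ [c]) =
      if c ∈ l then PySem.List.dedup l else PySem.List.dedup l ++ [c] := by
  show PySem.Set.ofList (l ++ [c]) = _
  unfold PySem.Set.ofList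
  rw [List.foldl_append]
  simp only [List.foldl_cons, List.foldl_nil]
  show PySem.Set.add (PySem.List.dedup l) c = _
  unfold PySem.Set.add
  by_cases hc : c ∈ l
  · rw [if_pos, if_pos hc]
    simp only [PySem.Set.contains, List.contains_eq_mem, decide_eq_true_eq]
    exact (PySem.List.mem_dedup l c).mpr hc
  · rw [if_neg, if_neg hc]
    simp only [PySem.Set.contains, List.contains_eq_mem, decide_eq_true_eq]
    exact fun h => hc ((PySem.List.mem_dedup l c).mp h)

-- first-occurrence indices are strictly increasing along dedup
theorem dedup_index_pairwise {α : Type} [BEq α] [LawfulBEq α] (l : List α) :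
    (PySem.List.dedup l).Pairwise
      (fun a b => ((PySem.List.index? l a).getD 0 : Nat) < ((PySem.List.index? l b).getD 0 : Nat)) := by
  induction l using List.reverseRecOn with
  | nil => simp [PySem.List.dedup, PySem.Set.ofList, PySem.Set.empty]
  | append_singleton l c ih =>
    have hmemidx : ∀ a ∈ PySem.List.dedup l,
        PySem.List.index? (l ++ [c]) a = PySem.List.index? l a := by
      intro a ha
      exact PySem.List.index?_append_of_mem [c] ((PySem.List.mem_dedup l a).mp ha)
    rw [dedup_append_singleton]
    by_cases hc : c ∈ l
    · rw [if_pos hc]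
      refine ih.imp_of_mem ?_
      intro a b ha hb hab
      rw [hmemidx a ha, hmemidx b hb]; exact hab
    · rw [if_neg hc]
      rw [List.pairwise_append]
      refine ⟨ih.imp_of_mem (fun {a b} ha hb hab => by rw [hmemidx a ha, hmemidx b hb]; exact hab),
        by simp, ?_⟩
      intro a ha b hb
      rcases List.mem_singleton.mp hb
      rw [hmemidx a ha, PySem.List.index?_append_singleton_self l c hc]
      have haml : a ∈ l := (PySem.List.mem_dedup l a).mp ha
      rcases hidx : PySem.List.index? l a with _ | k
      · exfalso
        rw [PySem.List.index?_eq_idxOf?] at hidx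
        exact List.idxOf?_eq_none_iff.mp hidx haml
      · rcases PySem.List.getElem_of_index?_eq_some hidx with ⟨hk, _, _⟩
        simpa using hk

-- A's loop body collapses to a single keyed insert
theorem stepA_eq (f : String → String) (d : PySem.Dict String (List String)) (can : String) :
    (let loc := f can
     let d' := if d.contains loc then d else d.insert loc ([] : List String)
     d'.insert loc (d'.getD loc [] ++ [can]))
    = d.insert (f can) (d.getD (f can) [] ++ [can]) := by
  by_cases hc : d.contains (f can)
  · simp only [hc, if_pos]
  · simp only [Bool.not_eq_true] at hc
    simp only [hc, Bool.false_eq_true, if_false]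
    rw [PySem.Dict.getD_insert_self, PySem.Dict.insert_insert_self,
      PySem.Dict.getD_of_not_contains d [] hc]

theorem getD_group_foldl (f : String → String) :
    ∀ (l : List String) (d : PySem.Dict String (List String)) (c : String),
    (l.foldl (fun d x => d.insert (f x) (d.getD (f x) [] ++ [x])) d).getD c []
      = d.getD c [] ++ l.filter (fun x => f x == c) := by
  intro l
  induction l with
  | nil => intro d c; simp
  | cons x l ih =>
    intro d c
    rw [List.foldl_cons, ih, PySem.Dict.getD_insert, List.filter_cons]
    by_cases hc : c = f x
    · simp [hc]
    · have : (f x == c) = false := by simp [Ne.symm hc]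
      simp [hc, this]

-- first_idx dict: getD is the first-occurrence index (offset by the enumerate start)
theorem first_idx_aux (f : String → String) :
    ∀ (l : List String) (s : Int) (d : PySem.Dict String Int) (c : String),
    ((PySem.List.enumerate l s).foldl
        (fun d p => if d.contains (f p.2) then d else d.insert (f p.2) p.1) d).getD c 0
      = if d.contains c then d.getD c 0
        else (match PySem.List.index? (l.map f) c with
              | some i => s + (i : Int)
              | none => 0) := by
  intro l
  induction l with
  | nil =>
    intro s d c
    simp only [PySem.List.enumerate, List.foldl_nil, List.map_nil]
    by_cases hc : d.contains c
    · rw [if_pos hc]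
    · rw [if_neg (by simp [hc]), PySem.Dict.getD_of_not_contains d 0 (by simpa using hc)]
      simp [PySem.List.index?]
  | cons x l ih =>
    intro s d c
    have henum : PySem.List.enumerate (x :: l) s = (s, x) :: PySem.List.enumerate l (s + 1) := rfl
    rw [henum, List.foldl_cons, ih]
    by_cases hdx : d.contains (f x)
    · simp only [hdx, if_pos]
      by_cases hc : d.contains c
      · rw [if_pos hc, if_pos hc]
      · rw [if_neg (by simp [hc]), if_neg (by simp [hc])]
        by_cases hcx : c = f x
        · subst hcx; exact absurd hdx (by simp [hc])
        · rw [List.map_cons, PySem.List.index?_cons_of_ne _ (fun h => hcx h.symm)]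
          rcases PySem.List.index? (l.map f) c with _ | i <;> simp <;> omega
    · simp only [hdx, Bool.false_eq_true, if_false]
      by_cases hcx : c = f x
      · subst hcx
        rw [if_pos (by simp), PySem.Dict.getD_insert_self,
          if_neg (by simpa using hdx), List.map_cons]
        simp [PySem.List.index?_eq_idxOf?, List.idxOf?_cons]
      · have hci : (d.insert (f x) s).contains c = d.contains c := by
          rw [PySem.Dict.contains_insert]; simp [hcx]
        rw [hci, PySem.Dict.getD_insert, if_neg hcx]
        by_cases hc : d.contains c
        · rw [if_pos hc, if_pos hc]
        · rw [if_neg (by simp [hc]), if_neg (by simp [hc]), List.map_cons,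
            PySem.List.index?_cons_of_ne _ (fun h => hcx h.symm)]
          rcases PySem.List.index? (l.map f) c with _ | i <;> simp <;> omega

theorem pvLex_comp {α κ : Type} (f : α → κ) (g1 g2 : κ → Int) (a b : α) :
    pvLex (fun x => g1 (f x)) (fun x => g2 (f x)) a b = pvLex g1 g2 (f a) (f b) := rfl

-- the stable element sort by a per-group key is the flatten of the group-key sort
theorem stable_sort_flatten (f : String → String) (g1 g2 : String → Int) :
    ∀ (l : List String),
    (∀ c c', c ∈ l.map f → c' ∈ l.map f → g1 c = g1 c' → g2 c = g2 c' → c = c') →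
    PySem.List.sorted2 l (fun x => g1 (f x)) (fun x => g2 (f x)) false
      = (PySem.List.sorted2 (PySem.List.dedup (l.map f)) g1 g2 false).flatMap
          (fun c => l.filter (fun x => f x == c)) := by
  intro l
  induction l using List.reverseRecOn with
  | nil => intro _; rfl
  | append_singleton l x ih =>
    intro hinj
    set c := f x with hcdef
    set K := PySem.List.dedup (l.map f) with hK
    set grp : String → List String := fun b => l.filter (fun y => f y == b) with hgrp
    set B := PySem.List.sorted2 K g1 g2 false with hB
    have hIH : PySem.List.sorted2 l (fun y => g1 (f y)) (fun y => g2 (f y)) false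
        = B.flatMap grp :=
      ih (fun c c' hc hc' e1 e2 => hinj c c' (by simp [hc]) (by simp [hc']) e1 e2)
    have hLHS : PySem.List.sorted2 (l ++ [x]) (fun y => g1 (f y)) (fun y => g2 (f y)) false
        = PySem.List.insertBy (pvLex (fun y => g1 (f y)) (fun y => g2 (f y))) x
            (B.flatMap grp) := by
      rw [sorted2_eq_foldl, List.foldl_append, ← sorted2_eq_foldl, hIH]
      rfl
    have hBperm : ∀ b, b ∈ B ↔ b ∈ K := fun b =>
      (PySem.List.sorted2_perm (xs := K) (k1 := g1) (k2 := g2) (rev := false)).mem_iff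
    have hKmem : ∀ b ∈ K, b ∈ l.map f := fun b hb => (PySem.List.mem_dedup _ _).mp hb
    have hBnodup : B.Nodup :=
      ((PySem.List.sorted2_perm (xs := K) (k1 := g1) (k2 := g2) (rev := false)).nodup_iff).mpr
        (PySem.List.nodup_dedup _)
    have hBpair : B.Pairwise (fun a b => pvLex g1 g2 a b = true) := by
      have h1 : B.Pairwise (fun a b => pvLex g1 g2 b a = false) := by
        rw [hB, sorted2_eq_foldl]; exact foldl_insertBy_pairwise g1 g2 K
      have h2 := h1.and (List.Pairwise.imp (fun h => h) hBnodup)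
      refine h2.imp_of_mem ?_
      intro a b ha hb ⟨hfalse, hne⟩
      by_contra hab
      have hab' : pvLex g1 g2 a b = false := by
        cases h : pvLex g1 g2 a b
        · rfl
        · exact absurd h hab
      rcases pvLex_keys_eq_of_both_false g1 g2 hab' hfalse with ⟨e1, e2⟩
      exact hne (hinj a b (by simp [hKmem a ((hBperm a).mp ha)])
        (by simp [hKmem b ((hBperm b).mp hb)]) e1 e2)
    have hgrpkey : ∀ b, ∀ y ∈ grp b, f y = b := by
      intro b y hy
      have := List.mem_filter.mp hy
      simpa using this.2
    have hgrpne : ∀ b ∈ K, grp b ≠ [] := by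
      intro b hb hnil
      rcases List.mem_map.mp (hKmem b hb) with ⟨y, hyl, rfl⟩
      have : y ∈ grp (f y) := List.mem_filter.mpr ⟨hyl, by simp⟩
      rw [hnil] at this; exact List.not_mem_nil this
    have hgrp' : ∀ b, (l ++ [x]).filter (fun y => f y == b)
        = grp b ++ (if c == b then [x] else []) := by
      intro b
      rw [List.filter_append, hgrp]
      congr 1
      simp [List.filter_cons, hcdef]
    by_cases hc : c ∈ l.map f
    · -- existing location: x joins the end of its block
      have hKeq : PySem.List.dedup ((l ++ [x]).map f) = K := by
        rw [List.map_append, List.map_cons, List.map_nil, dedup_append_singleton, if_pos hc]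
      have hcK : c ∈ K := (PySem.List.mem_dedup _ _).mpr hc
      have hcB : c ∈ B := (hBperm c).mpr hcK
      rcases List.append_of_mem hcB with ⟨pre, suf, hsplit⟩
      have hpairs := hsplit ▸ hBpair
      rcases List.pairwise_append.mp hpairs with ⟨hp1, hp2, hp3⟩
      have hpre : ∀ b ∈ pre, pvLex g1 g2 b c = true := fun b hb => hp3 b hb c (by simp)
      have hsuf : ∀ b ∈ suf, pvLex g1 g2 c b = true := (List.pairwise_cons.mp hp2).1
      have hnd := hsplit ▸ hBnodup
      have hprene : ∀ b ∈ pre, b ≠ c := by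
        intro b hb
        rcases List.pairwise_append.mp hnd with ⟨-, -, hcross⟩
        exact hcross b hb c (by simp)
      have hsufne : ∀ b ∈ suf, b ≠ c := by
        intro b hb
        rcases List.pairwise_append.mp hnd with ⟨-, hns, -⟩
        exact fun h => (List.pairwise_cons.mp hns).1 b hb h.symm
      rw [hLHS, hKeq, ← hB, hsplit]
      rw [List.flatMap_append, List.flatMap_cons]
      rw [insertBy_append_not _ _ _ _ ?hpre]
      case hpre =>
        intro y hy
        rcases List.mem_flatMap.mp hy with ⟨b, hb, hyb⟩
        rw [pvLex_comp, hgrpkey b y hyb, ← hcdef]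
        exact pvLex_asymm g1 g2 (hpre b hb)
      rw [insertBy_append_not _ _ _ _ ?hself]
      case hself =>
        intro y hy
        rw [pvLex_comp, hgrpkey c y hy, ← hcdef]
        exact pvLex_eq_false_of_keys_eq g1 g2 rfl rfl
      have hstep : PySem.List.insertBy (pvLex (fun y => g1 (f y)) (fun y => g2 (f y))) x
          (suf.flatMap grp) = x :: suf.flatMap grp := by
        cases hsufc : suf with
        | nil => simp [insertBy_nil]
        | cons b0 suf' =>
          have hb0K : b0 ∈ K := (hBperm b0).mp (by rw [hsplit, hsufc]; simp)
          rcases hgb0 : grp b0 with _ | ⟨y0, ys⟩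
          · exact absurd hgb0 (hgrpne b0 hb0K)
          · rw [List.flatMap_cons, hgb0, List.cons_append, insertBy_cons]
            rw [pvLex_comp, hgrpkey b0 y0 (by rw [hgb0]; simp), ← hcdef,
              if_pos (hsuf b0 (by rw [hsufc]; simp))]
      rw [hstep]
      have e1 : pre.flatMap (fun b => (l ++ [x]).filter (fun y => f y == b)) = pre.flatMap grp :=
        List.flatMap_congr (fun b hb => by
          rw [hgrp' b, if_neg (by simpa using (Ne.symm (hprene b hb))), List.append_nil])
      have e2 : suf.flatMap (fun b => (l ++ [x]).filter (fun y => f y == b)) = suf.flatMap grp :=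
        List.flatMap_congr (fun b hb => by
          rw [hgrp' b, if_neg (by simpa using (Ne.symm (hsufne b hb))), List.append_nil])
      have e3 : (l ++ [x]).filter (fun y => f y == c) = grp c ++ [x] := by
        rw [hgrp' c, if_pos (by simp)]
      rw [List.flatMap_append, List.flatMap_cons, e1, e2, e3]
      simp
    · -- new location: a new singleton block is inserted among the blocks
      have hKeq : PySem.List.dedup ((l ++ [x]).map f) = K ++ [c] := by
        rw [List.map_append, List.map_cons, List.map_nil, dedup_append_singleton, if_neg hc]
      have hB' : PySem.List.sorted2 (K ++ [c]) g1 g2 false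
          = PySem.List.insertBy (pvLex g1 g2) c B := by
        rw [sorted2_eq_foldl, List.foldl_append, ← sorted2_eq_foldl, ← hB]
        rfl
      have hgrpc : grp c = [] := by
        rw [hgrp]
        refine List.filter_eq_nil_iff.mpr ?_
        intro y hy hfy
        exact hc (List.mem_map.mpr ⟨y, hy, by simpa using hfy⟩)
      have hKne : ∀ b ∈ K, b ≠ c := by
        intro b hb he
        exact hc (he ▸ hKmem b hb)
      have ec : (l ++ [x]).filter (fun y => f y == c) = [x] := by
        rw [hgrp' c, if_pos (by simp), hgrpc, List.nil_append]
      rw [hLHS, hKeq, hB']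
      -- auxiliary induction over the block list
      suffices haux : ∀ bs : List String, (∀ b ∈ bs, b ∈ K) →
          PySem.List.insertBy (pvLex (fun y => g1 (f y)) (fun y => g2 (f y))) x
              (bs.flatMap grp)
            = (PySem.List.insertBy (pvLex g1 g2) c bs).flatMap
                (fun b => (l ++ [x]).filter (fun y => f y == b)) by
        exact haux B (fun b hb => (hBperm b).mp hb)
      intro bs
      induction bs with
      | nil =>
        intro _
        rw [List.flatMap_nil, insertBy_nil, insertBy_nil, List.flatMap_cons, List.flatMap_nil,
          ec, List.append_nil]
      | cons b bs ihb =>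
        intro hmem
        have hbK : b ∈ K := hmem b (by simp)
        have hbc : b ≠ c := hKne b hbK
        have eb : (l ++ [x]).filter (fun y => f y == b) = grp b := by
          rw [hgrp' b, if_neg (by simpa using (Ne.symm hbc)), List.append_nil]
        rcases hgb : grp b with _ | ⟨y0, ys⟩
        · exact absurd hgb (hgrpne b hbK)
        · by_cases hlt : pvLex g1 g2 c b = true
          · have ebs : bs.flatMap (fun b' => (l ++ [x]).filter (fun y => f y == b'))
                = bs.flatMap grp :=
              List.flatMap_congr (fun b' hb' => by
                rw [hgrp' b', if_neg (by simpa using (Ne.symm (hKne b' (hmem b' (by simp [hb']))))),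
                  List.append_nil])
            rw [List.flatMap_cons, hgb, List.cons_append, insertBy_cons,
              pvLex_comp, hgrpkey b y0 (by rw [hgb]; simp), ← hcdef, if_pos hlt,
              insertBy_cons, if_pos hlt, List.flatMap_cons, List.flatMap_cons,
              ec, eb, ebs, hgb]
            simp
          · have hltf : pvLex g1 g2 c b = false := by
              cases h : pvLex g1 g2 c b
              · rfl
              · exact absurd h hlt
            rw [List.flatMap_cons, insertBy_append_not _ _ _ _ ?hgb2]
            case hgb2 =>
              intro y hy
              rw [pvLex_comp, hgrpkey b y hy, ← hcdef]
              exact hltf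
            rw [ihb (fun b' hb' => hmem b' (by simp [hb'])), insertBy_cons,
              if_neg (by simp [hltf]), List.flatMap_cons, eb]

theorem ports_agree (cl : List String) (sld : List (String × String)) :
    get_canister_sorted_on_source_location cl sld
      = get_canister_sorted_on_source_location_alt cl sld := by
  set f : String → String := pvLoc sld with hf
  set grp : String → List String := fun c => cl.filter (fun x => f x == c) with hgrp
  set dA : PySem.Dict String (List String) :=
    cl.foldl (fun d x => d.insert (f x) (d.getD (f x) [] ++ [x])) PySem.Dict.empty with hdA
  set counts : PySem.Dict String Int :=
    cl.foldl (fun d can => d.insert (f can) (d.getD (f can) 0 + 1)) PySem.Dict.empty with hcounts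
  set first_idx : PySem.Dict String Int :=
    (PySem.List.enumerate cl).foldl (fun d p =>
      if d.contains (f p.2) then d else d.insert (f p.2) p.1) PySem.Dict.empty with hfirst
  set g1 : String → Int := fun c => -(counts.getD c 0) with hg1
  set g2 : String → Int := fun c => first_idx.getD c 0 with hg2
  -- the two ports, let-reduced
  have hA : get_canister_sorted_on_source_location cl sld
      = (PySem.List.sorted dA.keys (fun k => (dA.getD k []).length) true).flatMap
          (fun k => dA.getD k []) := by
    have hfun : (fun (d : PySem.Dict String (List String)) can =>
        let loc := pvLoc sld can
        let d' := if d.contains loc then d else d.insert loc ([] : List String)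
        d'.insert loc (d'.getD loc [] ++ [can]))
        = fun d x => d.insert (f x) (d.getD (f x) [] ++ [x]) := by
      funext d can; exact stepA_eq f d can
    show (PySem.List.sorted (cl.foldl _ PySem.Dict.empty).keys _ true).flatMap _ = _
    rw [hfun, ← hdA]
  have hB : get_canister_sorted_on_source_location_alt cl sld
      = PySem.List.sorted2 cl (fun x => g1 (f x)) (fun x => g2 (f x)) false := rfl
  -- dictionary characterizations
  have hgd : (fun k => dA.getD k []) = grp := by
    funext c
    rw [hdA, getD_group_foldl f cl PySem.Dict.empty c]
    simp [hgrp]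
  have hcnt : ∀ c, counts.getD c 0 = ((grp c).length : Int) := by
    intro c
    have h1 := PySem.Dict.getD_foldl_insert_add_one (l := cl.map f) (d := PySem.Dict.empty) (v := c)
    rw [List.foldl_map] at h1
    rw [hcounts, h1, PySem.Dict.getD_empty]
    have h2 : (cl.map f).count c = (grp c).length := by
      rw [List.count_eq_countP, List.countP_map, hgrp, ← List.countP_eq_length_filter]
      rfl
    rw [h2]
    omega
  have hgd' : ∀ k, dA.getD k [] = grp k := fun k => congrFun hgd k
  have hidxc : ∀ c, first_idx.getD c 0 = (((PySem.List.index? (cl.map f) c).getD 0 : Nat) : Int) := by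
    intro c
    rw [hfirst, first_idx_aux f cl 0 PySem.Dict.empty c,
      if_neg (by rw [PySem.Dict.contains_empty]; simp)]
    rcases h : PySem.List.index? (cl.map f) c with _ | i
    · simp
    · simp
  have hkeys : dA.keys = PySem.List.dedup (cl.map f) := by
    rw [hdA, PySem.Dict.keys_foldl_insert_key, PySem.Dict.keys_empty]
    rfl
  have hpair : (PySem.List.dedup (cl.map f)).Pairwise
      (fun a b => (((PySem.List.index? (cl.map f) a).getD 0 : Nat) : Int)
        < (((PySem.List.index? (cl.map f) b).getD 0 : Nat) : Int)) := by
    refine (dedup_index_pairwise (cl.map f)).imp ?_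
    intro a b h
    exact_mod_cast h
  have hinj : ∀ c c', c ∈ cl.map f → c' ∈ cl.map f → g1 c = g1 c' → g2 c = g2 c' → c = c' := by
    intro c c' hc hc' _ h2
    simp only [hg2] at h2
    rw [hidxc c, hidxc c'] at h2
    have h2' : (PySem.List.index? (cl.map f) c).getD 0 = (PySem.List.index? (cl.map f) c').getD 0 := by
      exact_mod_cast h2
    rcases hi : PySem.List.index? (cl.map f) c with _ | i
    · exfalso
      rw [PySem.List.index?_eq_idxOf?] at hi
      exact List.idxOf?_eq_none_iff.mp hi hc
    rcases hi' : PySem.List.index? (cl.map f) c' with _ | i'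
    · exfalso
      rw [PySem.List.index?_eq_idxOf?] at hi'
      exact List.idxOf?_eq_none_iff.mp hi' hc'
    rw [hi, hi'] at h2'
    simp only [Option.getD_some] at h2'
    subst h2'
    rcases PySem.List.getElem_of_index?_eq_some hi with ⟨hk, he, -⟩
    rcases PySem.List.getElem_of_index?_eq_some hi' with ⟨hk', he', -⟩
    rw [← he, ← he']
  have hg2eq : (fun c => (((PySem.List.index? (cl.map f) c).getD 0 : Nat) : Int)) = g2 := by
    funext c
    simp only [hg2]
    exact (hidxc c).symm
  have hg1eq : (fun c => -(((fun k => (grp k).length) c : Nat) : Int)) = g1 := by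
    funext c
    show -((grp c).length : Int) = g1 c
    simp only [hg1]
    rw [hcnt c]
  have hsort : PySem.List.sorted dA.keys (fun k => (grp k).length) true
      = PySem.List.sorted2 (PySem.List.dedup (cl.map f)) g1 g2 false := by
    rw [hkeys, sortRev_eq_sorted2 (fun k => (grp k).length)
      (fun c => (((PySem.List.index? (cl.map f) c).getD 0 : Nat) : Int))
      (PySem.List.dedup (cl.map f)) hpair, hg2eq, hg1eq]
  rw [hA, hB]
  simp only [hgd']
  rw [hsort, stable_sort_flatten f g1 g2 cl hinj]

-- ===== VERDICT (by name: the statement is the Claim_ definition above) =====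
theorem get_canister_sorted_on_source_location_spec : Claim_equal_get_canister_sorted_on_source_location := by
  intro canister_list source_location_dict _ _
  unfold Spec_get_canister_sorted_on_source_location
  exact ports_agree canister_list source_location_dict
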